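-- pv_equiv track=rewrite | github.com/jontk/opnsense-cli | generate/parser/name_transform.py | _group_single_chars
-- ===== SOURCE A (Python) =====
-- def _group_single_chars(parts: list[str]) -> list[str]:
--     """Group consecutive single-character parts into acronyms.
--
--     ['get', 'alias', 'u', 'u', 'i', 'd'] -> ['get', 'alias', 'UUID']
--     ['get', 'c', 'p', 'u', 'type'] -> ['get', 'CPU', 'type']
--     """
--     grouped: list[str] = []
--     i = 0
--     while i < len(parts):
--         if len(parts[i]) == 1:
--             # Collect consecutive single chars
--             acronym = []
--             while i < len(parts) and len(parts[i]) == 1: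
--                 acronym.append(parts[i].upper())
--                 i += 1
--             grouped.append("".join(acronym))
--         else:
--             grouped.append(parts[i])
--             i += 1
--     return grouped
-- ===== SOURCE B (Python) =====
-- def _group_single_chars(parts: list[str]) -> list[str]:
--     """Group consecutive single-character parts into acronyms.
--
--     Single pass with a flag: a single-char part either starts a new
--     acronym or is appended (uppercased) onto the one being built.
--     """
--     grouped: list[str] = []
--     prev_single = False
--     for p in parts:
--         if len(p) == 1:
--             if prev_single:
--                 grouped[-1] += p.upper()
--             else:
--                 grouped.append(p.upper())
--             prev_single = True
--         else:
--             grouped.append(p)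
--             prev_single = False
--     return grouped
-- ===== Notes on version B (the rewrite author's own statement) =====
-- stated objective: simpler
-- what changed: Replaced A's index-driven outer while loop with a nested inner while that collects an acronym buffer and joins it, by a single for-loop over the parts carrying one boolean flag, extending the last emitted acronym in place.
import Mathlib
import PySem

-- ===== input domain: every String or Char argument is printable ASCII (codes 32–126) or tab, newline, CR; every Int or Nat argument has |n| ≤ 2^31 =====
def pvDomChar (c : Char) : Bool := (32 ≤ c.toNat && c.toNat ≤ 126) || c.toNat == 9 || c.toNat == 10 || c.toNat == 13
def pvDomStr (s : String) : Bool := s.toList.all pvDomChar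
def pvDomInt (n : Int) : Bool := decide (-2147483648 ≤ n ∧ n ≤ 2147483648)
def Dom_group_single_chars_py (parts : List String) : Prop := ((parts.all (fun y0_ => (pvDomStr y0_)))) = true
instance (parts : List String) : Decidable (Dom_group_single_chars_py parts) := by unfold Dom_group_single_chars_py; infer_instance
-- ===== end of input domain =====

-- B replaces A's index-driven nested while loops (inner loop building an acronym buffer then joined)
-- by a single pass carrying one boolean flag, extending the last emitted acronym in place (objective: simpler).

-- ===== PORT A =====
-- A's outer while / inner while as mutual recursion; the inner while's first iteration is
-- unrolled (its guard holds on entry), the acronym buffer and the final "".join are kept.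
mutual
def goA_group : List String → List String
  | [] => []
  | p :: rest =>
    if PySem.Str.len p = 1 then innerA_group rest [PySem.Str.upper p]
    else p :: goA_group rest
termination_by l => (l.length, 0)

def innerA_group : List String → List String → List String
  | [], acr => [PySem.Str.join "" acr]
  | p :: rest, acr =>
    if PySem.Str.len p = 1 then innerA_group rest (acr ++ [PySem.Str.upper p])
    else PySem.Str.join "" acr :: goA_group (p :: rest)
termination_by l _ => (l.length, 1)
end

def group_single_chars_py (parts : List String) : List String := goA_group parts

-- ===== PORT B =====
-- one fold step: state = (grouped, prev_single); grouped[-1] += p.upper() on a run continuation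
def stepB_group (st : List String × Bool) (p : String) : List String × Bool :=
  if PySem.Str.len p = 1 then
    -- grouped[-1]: the flag st.2 guarantees the list is nonempty, so the -1 index is its last element
    if st.2 then (st.1.dropLast ++ [st.1.getLastD "" ++ PySem.Str.upper p], true)
    else (st.1 ++ [PySem.Str.upper p], true)
  else (st.1 ++ [p], false)

def group_single_chars_py_alt (parts : List String) : List String :=
  (parts.foldl stepB_group ([], false)).1

-- ===== PRECONDITION & SPEC =====
def Spec_group_single_chars_py (parts : List String) (out : List String) : Prop := out = group_single_chars_py_alt parts
instance (parts : List String) (out : List String) : Decidable (Spec_group_single_chars_py parts out) := by unfold Spec_group_single_chars_py; infer_instance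

-- ===== CLAIM (what is proved, stated in full; the proofs are below) =====
def Claim_equal_group_single_chars_py : Prop := ∀ (parts : List String), Dom_group_single_chars_py parts → Spec_group_single_chars_py parts (group_single_chars_py parts)

-- ===== LEMMAS AND PROOFS =====

theorem goA_nil : goA_group [] = [] := by rw [goA_group.eq_def]

theorem goA_cons (p : String) (rest : List String) :
    goA_group (p :: rest) =
      if PySem.Str.len p = 1 then innerA_group rest [PySem.Str.upper p]
      else p :: goA_group rest := by
  rw [goA_group.eq_def]

theorem innerA_nil (acr : List String) : innerA_group [] acr = [PySem.Str.join "" acr] := by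
  rw [innerA_group.eq_def]

theorem innerA_cons (p : String) (rest acr : List String) :
    innerA_group (p :: rest) acr =
      if PySem.Str.len p = 1 then innerA_group rest (acr ++ [PySem.Str.upper p])
      else PySem.Str.join "" acr :: goA_group (p :: rest) := by
  rw [innerA_group.eq_def]

theorem chars_join_nil_concat (ls : List (List Char)) (cs : List Char) :
    PySem.Chars.join [] (ls ++ [cs]) = PySem.Chars.join [] ls ++ cs := by
  induction ls with
  | nil => simp [PySem.Chars.join, List.intercalate]
  | cons a ls ih =>
    cases ls with
    | nil => simp [PySem.Chars.join, List.intercalate]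
    | cons b ls =>
      rw [List.cons_append] at ih
      rw [List.cons_append, List.cons_append, PySem.Chars.join_cons_cons,
        PySem.Chars.join_cons_cons, ih]
      simp

theorem join_nil_concat (l : List String) (x : String) :
    PySem.Str.join "" (l ++ [x]) = PySem.Str.join "" l ++ x := by
  simp only [PySem.Str.join, List.map_append, List.map_cons, List.map_nil]
  rw [show "".toList = ([] : List Char) from rfl, chars_join_nil_concat]
  simp

theorem getLastD_concat_str (l : List String) (x d : String) : (l ++ [x]).getLastD d = x := by
  induction l generalizing d with
  | nil => rfl
  | cons a l ih => rw [List.cons_append, List.getLastD_cons]; exact ih a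

-- joint invariant for the fold of B against A's two mutually recursive loops
theorem invB_group (parts : List String) :
    (∀ grouped, (parts.foldl stepB_group (grouped, false)).1 = grouped ++ goA_group parts) ∧
    (∀ grouped acr, (parts.foldl stepB_group (grouped ++ [PySem.Str.join "" acr], true)).1
        = grouped ++ innerA_group parts acr) := by
  induction parts with
  | nil => simp [goA_nil, innerA_nil]
  | cons p rest ih =>
    constructor
    · intro grouped
      by_cases h : PySem.Str.len p = 1
      · simp only [List.foldl_cons, stepB_group, h, if_pos, Bool.false_eq_true, if_false]
        rw [goA_cons, if_pos h]
        have := ih.2 grouped [PySem.Str.upper p]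
        simpa [PySem.Str.join, PySem.Chars.join_singleton] using this
      · simp only [List.foldl_cons, stepB_group, h, if_false, Bool.false_eq_true]
        rw [goA_cons, if_neg h]
        have := ih.1 (grouped ++ [p])
        simpa using this
    · intro grouped acr
      by_cases h : PySem.Str.len p = 1
      · simp only [List.foldl_cons, stepB_group, h, if_pos]
        rw [List.dropLast_concat, getLastD_concat_str, innerA_cons, if_pos h]
        have := ih.2 grouped (acr ++ [PySem.Str.upper p])
        rw [join_nil_concat] at this
        simpa using this
      · simp only [List.foldl_cons, stepB_group, h, if_false]
        rw [innerA_cons, if_neg h]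
        have := ih.1 (grouped ++ [PySem.Str.join "" acr] ++ [p])
        rw [goA_cons, if_neg h]
        simpa using this

-- ===== VERDICT (by name: the statement is the Claim_ definition above) =====
theorem group_single_chars_py_spec : Claim_equal_group_single_chars_py := by
  intro parts _
  unfold Spec_group_single_chars_py group_single_chars_py group_single_chars_py_alt
  have := (invB_group parts).1 []
  simp at this
  exact this.symm
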